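-- pv_equiv track=rewrite | github.com/ExcelsiorCJH/algorithm_solving | 03-Stack/q4869.py | calc
-- ===== SOURCE A (Python) =====
-- def calc(n):
--     l = [0, 1]
--     for idx in range(2, n+1):
--         if idx % 2 == 0:
--             l.append(l[idx-1]*2 + 1)
--         else:
--             l.append(l[idx-1]*2 - 1)
--
--     return l[-1]
-- ===== SOURCE B (Python) =====
-- def calc(n):
--     # closed form of the alternating doubling recurrence (Jacobsthal-like):
--     # a(m) = (2**(m+1) + (-1)**m) // 3 for m >= 1; the loop never runs for n < 2.
--     if n < 2:
--         return 1
--     return (2**(n+1) + (-1)**n) // 3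
-- ===== Notes on version B (the rewrite author's own statement) =====
-- stated objective: faster
-- what changed: Replaces the O(n) loop that materialises the whole list with the closed form (2^(n+1)+(-1)^n)//3 computed by integer exponentiation.
import Mathlib
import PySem

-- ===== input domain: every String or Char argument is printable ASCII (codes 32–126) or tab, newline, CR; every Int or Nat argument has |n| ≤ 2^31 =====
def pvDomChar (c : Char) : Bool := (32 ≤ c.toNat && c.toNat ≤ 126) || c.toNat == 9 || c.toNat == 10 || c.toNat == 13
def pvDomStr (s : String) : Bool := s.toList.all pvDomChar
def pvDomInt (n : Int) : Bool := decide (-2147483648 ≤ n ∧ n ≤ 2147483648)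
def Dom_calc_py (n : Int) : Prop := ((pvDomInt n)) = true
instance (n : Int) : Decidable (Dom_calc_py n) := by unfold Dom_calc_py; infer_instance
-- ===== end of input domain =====

-- B replaces A's O(n) list-building loop by the closed form (2^(n+1)+(-1)^n)//3 (faster: asymptotic in a timing run).

-- ===== PORT A =====
-- the for-loop over range(2, n+1); l[idx-1] is always in range here, so .getD 0 never fires
def calcLoopA (l : List Int) : List Int → List Int
  | [] => l
  | idx :: rest =>
      calcLoopA
        (l ++ [if PySem.Int.mod idx 2 = 0
                then (PySem.List.pyGet? l (idx - 1)).getD 0 * 2 + 1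
                else (PySem.List.pyGet? l (idx - 1)).getD 0 * 2 - 1]) rest

def calc_py (n : Int) : Int :=
  let l := calcLoopA [0, 1] (PySem.List.pyRange 2 (n + 1) 1)
  (PySem.List.pyGet? l (-1)).getD 0  -- l[-1]; l is never empty, so the IndexError default never fires

-- ===== PORT B =====
def calc_py_alt (n : Int) : Int :=
  if n < 2 then 1
  else PySem.Int.floordiv (2 ^ (n + 1).toNat + (-1) ^ n.toNat) 3

-- ===== PRECONDITION & SPEC =====
def Spec_calc_py (n : Int) (out : Int) : Prop := out = calc_py_alt n
instance (n : Int) (out : Int) : Decidable (Spec_calc_py n out) := by unfold Spec_calc_py; infer_instance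

-- ===== CLAIM (what is proved, stated in full; the proofs are below) =====
def Claim_equal_calc_py : Prop := ∀ (n : Int), Dom_calc_py n → Spec_calc_py n (calc_py n)

-- ===== LEMMAS AND PROOFS =====

lemma calcLoopA_append (l : List Int) (xs ys : List Int) :
    calcLoopA l (xs ++ ys) = calcLoopA (calcLoopA l xs) ys := by
  induction xs generalizing l with
  | nil => rfl
  | cons x xs ih => simp [calcLoopA, ih]

-- invariant: after k loop iterations the list ends in a(k+1), which satisfies
-- 3*a(k+1) = 2^(k+2) + (-1)^(k+1), and has length k+2
lemma calcLoopA_inv (k : Nat) :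
    ∃ (L : List Int) (x : Int),
      calcLoopA [0, 1] (PySem.List.pyRange 2 (2 + (k : Int)) 1) = L ++ [x] ∧
      (L ++ [x]).length = k + 2 ∧
      3 * x = 2 ^ (k + 2) + (-1) ^ (k + 1) := by
  induction k with
  | zero =>
    refine ⟨[0], 1, ?_, by simp, by norm_num⟩
    have h : PySem.List.pyRange 2 (2 + ((0 : Nat) : Int)) 1 = [] :=
      PySem.List.pyRange_one_eq_nil (by norm_num)
    rw [h]; rfl
  | succ k ih =>
    obtain ⟨L, x, hL, hlen, hx⟩ := ih
    have hsplit : PySem.List.pyRange 2 (2 + ((k + 1 : Nat) : Int)) 1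
        = PySem.List.pyRange 2 (2 + (k : Int)) 1 ++ [2 + (k : Int)] := by
      have := PySem.List.pyRange_one_succ_right (a := 2) (b := 2 + (k : Int)) (by omega)
      push_cast
      rw [show (2 : Int) + ((k : Int) + 1) = (2 + (k : Int)) + 1 by ring, this]
    have hlenL : L.length = k + 1 := by simpa using hlen
    have hget : PySem.List.pyGet? (L ++ [x]) (2 + (k : Int) - 1) = some x := by
      have : (2 + (k : Int) - 1) = ((L.length : Nat) : Int) := by rw [hlenL]; push_cast; ring
      rw [this]
      exact PySem.List.pyGet?_append_length L [] x
    rw [hsplit, calcLoopA_append, hL]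
    simp only [calcLoopA, hget, Option.getD_some]
    by_cases hpar : k % 2 = 0
    · have hmod : PySem.Int.mod (2 + (k : Int)) 2 = 0 := by
        rw [PySem.Int.mod_eq_emod_of_pos (by norm_num)]; omega
      refine ⟨L ++ [x], x * 2 + 1, by rw [if_pos hmod], by simp [hlenL], ?_⟩
      have h1 : (-1 : Int) ^ (k + 1) = -1 := Odd.neg_one_pow ⟨k / 2, by omega⟩
      have h2 : (-1 : Int) ^ (k + 1 + 1) = 1 := by rw [pow_succ, h1]; ring
      have h3 : (2 : Int) ^ (k + 1 + 2) = 2 * 2 ^ (k + 2) := by ring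
      rw [h2, h3]; rw [h1] at hx; linarith
    · have hmod : PySem.Int.mod (2 + (k : Int)) 2 ≠ 0 := by
        rw [PySem.Int.mod_eq_emod_of_pos (by norm_num)]; omega
      refine ⟨L ++ [x], x * 2 - 1, by rw [if_neg hmod], by simp [hlenL], ?_⟩
      have h1 : (-1 : Int) ^ (k + 1) = 1 := Even.neg_one_pow ⟨(k + 1) / 2, by omega⟩
      have h2 : (-1 : Int) ^ (k + 1 + 1) = -1 := by rw [pow_succ, h1]; ring
      have h3 : (2 : Int) ^ (k + 1 + 2) = 2 * 2 ^ (k + 2) := by ring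
      rw [h2, h3]; rw [h1] at hx; linarith

theorem calc_py_spec : Claim_equal_calc_py := by
  intro n _
  unfold Spec_calc_py calc_py calc_py_alt
  by_cases hn : n < 2
  · have h : PySem.List.pyRange 2 (n + 1) 1 = [] :=
      PySem.List.pyRange_one_eq_nil (by omega)
    rw [if_pos hn, h]
    simp [calcLoopA, PySem.List.pyGet?_neg_one]
  · rw [if_neg hn]
    have hn2 : 2 ≤ n := by omega
    obtain ⟨L, x, hL, hlen, hx⟩ := calcLoopA_inv (n - 1).toNat
    have hcast : 2 + (((n - 1).toNat : Nat) : Int) = n + 1 := by omega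
    rw [hcast] at hL
    have he1 : (n + 1).toNat = (n - 1).toNat + 2 := by omega
    have he2 : n.toNat = (n - 1).toNat + 1 := by omega
    rw [hL]
    simp only [PySem.List.pyGet?_neg_one_append_singleton, Option.getD_some]
    rw [he1, he2, PySem.Int.floordiv_eq_ediv_of_pos (by norm_num)]
    omega
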